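-- pv_equiv track=rewrite | github.com/pypi-data/pypi-mirror-404 | packages/anatomize/anatomize-0.1.0-py3-none-any.whl/anatomize/pack/formats.py | _safe_fence
-- ===== SOURCE A (Python) =====
-- def _safe_fence(content: str) -> str:
--     # Use the shortest backtick fence that cannot appear in content.
--     # Markdown fences match a run of backticks at line start.
--     max_run = 0
--     run = 0
--     for ch in content:
--         if ch == "`":
--             run += 1
--             max_run = max(max_run, run)
--         else:
--             run = 0
--     return "`" * max(3, max_run + 1)
-- ===== SOURCE B (Python) =====
-- def _safe_fence(content: str) -> str:
--     # Two-pass decomposition: extract maximal backtick runs by masking and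
--     # splitting, then reduce with max (default 0).
--     masked = "".join(ch if ch == "`" else " " for ch in content)
--     runs = masked.split()
--     longest = max((len(run) for run in runs), default=0)
--     return "`" * max(3, longest + 1)
-- ===== Notes on version B (the rewrite author's own statement) =====
-- stated objective: alternative
-- what changed: Replaces the single stateful scan (running counter + running max) by a two-pass decomposition: mask non-backticks to spaces, split the masked string into maximal backtick runs, then take the max run length with default 0.
import Mathlib
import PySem

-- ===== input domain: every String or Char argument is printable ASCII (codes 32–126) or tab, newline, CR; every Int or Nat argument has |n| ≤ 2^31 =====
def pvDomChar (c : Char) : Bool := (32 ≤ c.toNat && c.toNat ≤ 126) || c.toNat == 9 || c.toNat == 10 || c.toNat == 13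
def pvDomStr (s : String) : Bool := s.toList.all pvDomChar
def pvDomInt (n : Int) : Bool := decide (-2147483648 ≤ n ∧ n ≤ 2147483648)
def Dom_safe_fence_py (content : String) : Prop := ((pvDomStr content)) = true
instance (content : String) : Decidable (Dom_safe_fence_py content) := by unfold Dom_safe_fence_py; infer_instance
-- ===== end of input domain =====

-- B replaces A's single stateful scan (running counter + running max) by masking
-- non-backticks to spaces, splitting into maximal backtick runs, and reducing with
-- max (default 0) — a genuinely different decomposition of the same task.


-- ===== PORT A =====
-- A's for-loop over the characters, carrying (max_run, run); counters are
-- nonnegative throughout in Python, so Nat is exact here.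
def safeFenceLoopA : List Char → Nat → Nat → Nat
  | [], maxRun, _run => maxRun
  | c :: rest, maxRun, run =>
    if c = '`' then safeFenceLoopA rest (max maxRun (run + 1)) (run + 1)
    else safeFenceLoopA rest maxRun 0

def safe_fence_py (content : String) : String :=
  String.mk (List.replicate (max 3 (safeFenceLoopA content.toList 0 0 + 1)) '`')

-- ===== PORT B =====
-- Source B: mask each non-backtick to ' ' ("".join of the generator), split the masked
-- string into runs, max of their lengths with default 0.
def safeFenceMask (c : Char) : Char := if c = '`' then c else ' '

def safe_fence_py_alt (content : String) : String :=
  let masked := content.toList.map safeFenceMask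
  let runs := PySem.Chars.split₀ masked
  let longest := PySem.List.maxD (runs.map List.length) id 0
  String.mk (List.replicate (max 3 (longest + 1)) '`')

-- ===== PRECONDITION & SPEC =====
def Spec_safe_fence_py (content : String) (out : String) : Prop := out = safe_fence_py_alt content
instance (content : String) (out : String) : Decidable (Spec_safe_fence_py content out) := by unfold Spec_safe_fence_py; infer_instance

-- ===== CLAIM (what is proved, stated in full; the proofs are below) =====
def Claim_equal_safe_fence_py : Prop := ∀ (content : String), Dom_safe_fence_py content → Spec_safe_fence_py content (safe_fence_py content)

-- ===== LEMMAS AND PROOFS =====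

-- split₀.go's accumulator only prepends the already-finished runs.
theorem split0_go_acc (l cur : List Char) (acc : List (List Char)) :
    PySem.Chars.split₀.go l cur acc = acc.reverse ++ PySem.Chars.split₀.go l cur [] := by
  induction l generalizing cur acc with
  | nil =>
      simp [PySem.Chars.split₀.go]
      split_ifs <;> simp
  | cons c rest ih =>
      simp only [PySem.Chars.split₀.go]
      split_ifs with hs hc
      · exact ih [] acc
      · rw [ih [] (cur.reverse :: acc), ih [] [cur.reverse]]
        simp
      · exact ih (c :: cur) acc

-- max? over Nats, once seeded, is a running max (stated for any step function
-- extensionally equal to max?'s, so it applies to PySem's own match-compiled one).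
theorem maxAux (f : Option Nat → Nat → Option Nat)
    (hf : ∀ m x, f (some m) x = if m < x then some x else some m)
    (xs : List Nat) (a : Nat) :
    List.foldl f (some a) xs = some (xs.foldl max a) := by
  induction xs generalizing a with
  | nil => rfl
  | cons x xs ih =>
      simp only [List.foldl, hf]
      split_ifs with h
      · rw [ih]
        have : max a x = x := by omega
        rw [this]
      · rw [ih]
        have : max a x = a := by omega
        rw [this]

theorem maxD_eq_foldl (xs : List Nat) :
    PySem.List.maxD xs id 0 = xs.foldl max 0 := by
  cases xs with
  | nil => rfl
  | cons x xs =>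
      simp only [PySem.List.maxD, PySem.List.max?, List.foldl]
      rw [maxAux _ (fun m y => by simp) xs x]
      simp

-- The key invariant: A's scan, seeded with current-run length and a prior max m,
-- computes the running max over the runs that B's split extracts from the mask.
theorem safe_fence_key (l cur : List Char) (m : Nat) :
    safeFenceLoopA l (max m cur.length) cur.length
      = ((PySem.Chars.split₀.go (l.map safeFenceMask) cur []).map List.length).foldl max m := by
  induction l generalizing cur m with
  | nil =>
      simp only [List.map_nil, PySem.Chars.split₀.go, safeFenceLoopA]
      split_ifs with h
      · simp_all
      · simp
  | cons c rest ih =>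
      by_cases hc : c = '`'
      · subst hc
        have hm : safeFenceMask '`' = '`' := rfl
        have hsp : PySem.Chars.isspace '`' = false := by decide
        simp only [List.map_cons, safeFenceLoopA, if_pos rfl, PySem.Chars.split₀.go, hm, hsp,
          Bool.false_eq_true, if_false]
        have h2 : max (max m cur.length) (cur.length + 1) = max m (cur.length + 1) := by omega
        rw [h2]
        have := ih ('`' :: cur) m
        simpa using this
      · have hm : safeFenceMask c = ' ' := by simp [safeFenceMask, hc]
        have hsp : PySem.Chars.isspace ' ' = true := by decide
        simp only [List.map_cons, hm, PySem.Chars.split₀.go, safeFenceLoopA, hc, if_neg, hsp,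
          if_pos, Bool.false_eq_true, if_false]
        by_cases hcur : cur = []
        · subst hcur
          simp only [List.isEmpty_nil, if_pos]
          have := ih [] m
          simpa using this
        · rw [if_neg (by simpa using hcur)]
          rw [split0_go_acc]
          simp only [List.reverse_cons, List.reverse_nil, List.nil_append, List.singleton_append,
            List.map_cons, List.foldl_cons, List.length_reverse]
          have := ih [] (max m cur.length)
          simpa using this

theorem safe_fence_main (l : List Char) :
    safeFenceLoopA l 0 0
      = PySem.List.maxD ((PySem.Chars.split₀ (l.map safeFenceMask)).map List.length) id 0 := by
  rw [maxD_eq_foldl, PySem.Chars.split₀]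
  have := safe_fence_key l [] 0
  simpa using this

-- ===== VERDICT (by name: the statement is the Claim_ definition above) =====
theorem safe_fence_py_spec : Claim_equal_safe_fence_py := by
  intro content _
  unfold Spec_safe_fence_py safe_fence_py safe_fence_py_alt
  rw [safe_fence_main]
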